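-- pv_equiv track=rewrite | github.com/tonnyaudio/abbreviation | generate_evaluation/utils.py | find_val_pos
-- ===== SOURCE A (Python) =====
-- def find_val_pos(sent, value):
--     ret = []
--     value = value.replace(' ', '').lower()
--     if value == '': return ret
--     ss = [x.replace(' ', '').lower() for x in sent]
--     for k, v in enumerate(ss):
--         if not value.startswith(v): continue
--         vi = 0
--         for j in range(k, len(ss)):
--             if value[vi:].startswith(ss[j]):
--                 vi += len(ss[j])
--                 if vi == len(value):
--                     ret.append((k, j + 1))
--             else:
--                 break
--     return ret
-- ===== SOURCE B (Python) =====
-- def find_val_pos(sent, value):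
--     value = value.replace(' ', '').lower()
--     if value == '':
--         return []
--     ss = [x.replace(' ', '').lower() for x in sent]
--     S = ''.join(ss)
--     offs = [0]
--     for t in ss:
--         offs.append(offs[-1] + len(t))
--     ends = {}
--     for e in range(1, len(ss) + 1):
--         ends.setdefault(offs[e], []).append(e)
--     L = len(value)
--     ret = []
--     for k in range(len(ss)):
--         es = ends.get(offs[k] + L)
--         if es and S.startswith(value, offs[k]):
--             for e in es:
--                 ret.append((k, e))
--     return ret
-- ===== Notes on version B (the rewrite author's own statement) =====
-- stated objective: alternative
-- what changed: A's per-start greedy rescan of tokens (running index vi with break) is replaced by one joined string with cumulative offsets and an offset-to-end-indices dictionary: each start does a single substring comparison and a dictionary lookup instead of an inner token scan.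
import Mathlib
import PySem

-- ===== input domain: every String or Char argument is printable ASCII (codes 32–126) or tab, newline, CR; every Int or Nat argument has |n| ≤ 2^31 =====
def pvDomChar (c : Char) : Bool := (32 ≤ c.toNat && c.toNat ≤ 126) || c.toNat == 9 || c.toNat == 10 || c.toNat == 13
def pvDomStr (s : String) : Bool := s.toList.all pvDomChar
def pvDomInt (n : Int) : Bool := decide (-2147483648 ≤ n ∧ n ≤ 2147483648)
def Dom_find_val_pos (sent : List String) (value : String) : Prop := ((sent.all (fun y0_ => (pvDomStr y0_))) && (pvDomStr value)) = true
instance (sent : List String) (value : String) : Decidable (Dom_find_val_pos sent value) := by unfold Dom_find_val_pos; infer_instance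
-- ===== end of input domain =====

-- B replaces A's per-start greedy token scan (with break and a running index vi) by one joined string
-- plus cumulative offsets and an offset→end-indices dictionary; objective: alternative decomposition.

-- ===== PORT A =====
-- x.replace(' ', '').lower() on code points
def pvNorm (s : String) : List Char :=
  PySem.Chars.lower (PySem.Chars.replace s.toList [' '] [])

-- inner 'for j in range(k, len(ss))' loop of A, with vi and break, over the remaining tokens ss[j:]
def pvInnerA (v : List Char) (k : Nat) : List (List Char) → Nat → Nat → List (Int × Int) → List (Int × Int)
  | [], _, _, ret => ret
  | t :: rest, j, vi, ret =>
    if PySem.Chars.startswith (PySem.Chars.slice v (some (vi : Int)) none) t then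
      let vi' := vi + t.length
      let ret' := if vi' = v.length then ret ++ [((k : Int), (j : Int) + 1)] else ret
      pvInnerA v k rest (j + 1) vi' ret'
    else ret

def find_val_pos (sent : List String) (value : String) : List (Int × Int) :=
  let ret : List (Int × Int) := []
  let v := pvNorm value
  if v = [] then ret
  else
    let ss := sent.map pvNorm
    (PySem.List.enumerate ss 0).foldl
      (fun ret kv =>
        if ¬ (PySem.Chars.startswith v kv.2 = true) then ret
        else pvInnerA v kv.1.toNat (ss.drop kv.1.toNat) kv.1.toNat 0 ret)
      ret

-- ===== PORT B =====
def find_val_pos_alt (sent : List String) (value : String) : List (Int × Int) :=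
  let v := pvNorm value
  if v = [] then []
  else
    let ss := sent.map pvNorm
    let S := ss.flatten                                    -- ''.join(ss)
    let offs := ss.foldl
      (fun offs t => offs ++ [PySem.List.pyGetD offs (-1) 0 + (t.length : Int)]) [(0 : Int)]
    let ends := (PySem.List.pyRange 1 ((ss.length : Int) + 1) 1).foldl
      (fun d e => d.modify (PySem.List.pyGetD offs e 0) [] (· ++ [e]))
      (PySem.Dict.empty (κ := Int) (ν := List Int))
    let L := (v.length : Int)
    (PySem.List.pyRange 0 (ss.length : Int) 1).foldl
      (fun ret k =>
        let es := ends.getD (PySem.List.pyGetD offs k 0 + L) []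
        -- 'if es and S.startswith(value, offs[k])': ported by hand; exact because offsets
        -- satisfy 0 ≤ offs[k] ≤ len(S), where startswith-at-start is 'value <+: S[offs[k]:]'
        if es ≠ [] ∧ PySem.Chars.startswith (S.drop (PySem.List.pyGetD offs k 0).toNat) v = true then
          ret ++ es.map (fun e => (k, e))
        else ret)
      []

-- ===== PRECONDITION & SPEC =====
def Spec_find_val_pos (sent : List String) (value : String) (out : List (Int × Int)) : Prop := out = find_val_pos_alt sent value
instance (sent : List String) (value : String) (out : List (Int × Int)) : Decidable (Spec_find_val_pos sent value out) := by unfold Spec_find_val_pos; infer_instance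

-- ===== CLAIM (what is proved, stated in full; the proofs are below) =====
def Claim_equal_find_val_pos : Prop := ∀ (sent : List String) (value : String), Dom_find_val_pos sent value → Spec_find_val_pos sent value (find_val_pos sent value)

-- ===== LEMMAS AND PROOFS =====

-- the greedy chain of A, abstracted: which token counts m (1-based) consume exactly r
def pvChain (r : List Char) : List (List Char) → List Nat
  | [] => []
  | t :: T =>
    if t <+: r then
      (if r.drop t.length = [] then [1] else []) ++ (pvChain (r.drop t.length) T).map (· + 1)
    else []

-- prefix sums of token lengths
def pvPref (ss : List (List Char)) (i : Nat) : Nat := ((ss.take i).map List.length).sum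

lemma pvPref_zero (ss : List (List Char)) : pvPref ss 0 = 0 := rfl

lemma pvPref_cons (t : List Char) (T : List (List Char)) (i : Nat) :
    pvPref (t :: T) (i + 1) = t.length + pvPref T i := by
  simp [pvPref]

lemma pvPref_add (ss : List (List Char)) (i d : Nat) :
    pvPref ss (i + d) = pvPref ss i + (((ss.drop i).take d).map List.length).sum := by
  simp [pvPref, List.take_add]

lemma pvPref_mono (ss : List (List Char)) {i j : Nat} (h : i ≤ j) : pvPref ss i ≤ pvPref ss j := by
  obtain ⟨d, rfl⟩ := Nat.exists_eq_add_of_le h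
  rw [pvPref_add]; omega

lemma pvFlatten_take (ss : List (List Char)) (i : Nat) :
    (ss.take i).flatten = ss.flatten.take (pvPref ss i) := by
  induction ss generalizing i with
  | nil => simp [pvPref]
  | cons t T ih =>
    cases i with
    | zero => simp [pvPref]
    | succ i =>
      rw [List.take_succ_cons, pvPref_cons]
      simp only [List.flatten_cons, ih]
      exact (List.take_length_add_append _).symm

lemma pvPref_le_len (ss : List (List Char)) (i : Nat) : pvPref ss i ≤ ss.flatten.length := by
  have h := congrArg List.length (pvFlatten_take ss i)
  simp only [List.length_take, List.length_flatten] at h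
  simp only [List.length_flatten, pvPref] at *
  omega

lemma pvMiddle (ss : List (List Char)) (k e : Nat) (h1 : k ≤ e) :
    ((ss.drop k).take (e - k)).flatten
      = (ss.flatten.drop (pvPref ss k)).take (pvPref ss e - pvPref ss k) := by
  obtain ⟨d, rfl⟩ := Nat.exists_eq_add_of_le h1
  have htk : ss.take (k + d) = ss.take k ++ (ss.drop k).take d := List.take_add ..
  have h2 : ss.flatten.take (pvPref ss (k + d))
      = ss.flatten.take (pvPref ss k) ++ ((ss.drop k).take d).flatten := by
    rw [← pvFlatten_take, htk, List.flatten_append, pvFlatten_take]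
  have h3 : (ss.flatten.take (pvPref ss (k + d))).drop (pvPref ss k)
      = ((ss.drop k).take d).flatten := by
    rw [h2]
    have hl : (ss.flatten.take (pvPref ss k)).length = pvPref ss k := by
      simp only [List.length_take]
      exact Nat.min_eq_left (pvPref_le_len ss k)
    have hdl := List.drop_left (l₁ := ss.flatten.take (pvPref ss k))
      (l₂ := ((ss.drop k).take d).flatten)
    rwa [hl] at hdl
  rw [Nat.add_sub_cancel_left, ← h3, List.drop_take]

lemma pvMiddle_len (ss : List (List Char)) (k e : Nat) (h1 : k ≤ e) :
    ((ss.drop k).take (e - k)).flatten.length = pvPref ss e - pvPref ss k := by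
  obtain ⟨d, rfl⟩ := Nat.exists_eq_add_of_le h1
  rw [List.length_flatten, Nat.add_sub_cancel_left]
  have := pvPref_add ss k d
  omega

-- pvChain as a filter over end positions
lemma pvChain_eq (r : List Char) (T : List (List Char)) :
    pvChain r T
      = ((List.range T.length).filter
          (fun j => decide ((T.take (j + 1)).flatten = r))).map (· + 1) := by
  induction T generalizing r with
  | nil => simp [pvChain]
  | cons t T ih =>
    simp only [pvChain, List.length_cons]
    by_cases hp : t <+: r
    · rw [if_pos hp]
      obtain ⟨u, hu⟩ := hp
      subst hu
      have hdrop : (t ++ u).drop t.length = u := List.drop_left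
      rw [hdrop, List.range_succ_eq_map, List.filter_cons, ih]
      have h0 : (decide (((t :: T).take (0 + 1)).flatten = t ++ u)) = decide (u = []) := by
        simp
      rw [h0, List.filter_map]
      have h1 : ((fun j => decide (((t :: T).take (j + 1)).flatten = t ++ u)) ∘ Nat.succ)
          = fun j => decide ((T.take (j + 1)).flatten = u) := by
        funext j
        simp [Function.comp, List.take_succ_cons]
      rw [h1]
      by_cases hu0 : u = []
      · subst hu0
        simp [List.map_map, Function.comp]
      · simp only [hu0, decide_false]
        simp [List.map_map, Function.comp]
    · rw [if_neg hp]
      symm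
      rw [List.map_eq_nil_iff, List.filter_eq_nil_iff]
      intro j hj
      simp only [decide_eq_true_eq]
      intro hflat
      exact hp ⟨(T.take j).flatten, by simpa [List.take_succ_cons] using hflat⟩

-- A's inner loop produces exactly the chain positions
lemma pvInnerA_eq (v : List Char) (k : Nat) (T : List (List Char)) (j vi : Nat)
    (ret : List (Int × Int)) (h : vi ≤ v.length) :
    pvInnerA v k T j vi ret
      = ret ++ (pvChain (v.drop vi) T).map (fun (m : Nat) => ((k : Int), (j : Int) + (m : Int))) := by
  induction T generalizing j vi ret with
  | nil => simp [pvInnerA, pvChain]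
  | cons t T ih =>
    have hslice : PySem.Chars.slice v (some (vi : Int)) none = v.drop vi := by
      simp [PySem.Chars.slice_eq_listSlice, PySem.List.slice_from_natCast]
    simp only [pvInnerA, hslice]
    by_cases hp : t <+: v.drop vi
    · rw [if_pos ((PySem.Chars.startswith_iff _ _).mpr hp)]
      have hlen : t.length ≤ v.length - vi := by
        have := hp.length_le
        simp only [List.length_drop] at this
        exact this
      have hd : (v.drop vi).drop t.length = v.drop (vi + t.length) := by
        rw [List.drop_drop, Nat.add_comm]
      rw [ih (j + 1) (vi + t.length) _ (by omega)]
      simp only [pvChain, if_pos hp, hd]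
      have hcond : (vi + t.length = v.length) ↔ (v.drop (vi + t.length) = []) := by
        rw [List.drop_eq_nil_iff]
        omega
      have hmap : (pvChain (v.drop (vi + t.length)) T).map
          ((fun (m : Nat) => ((k : Int), (j : Int) + (m : Int))) ∘ (· + 1))
          = (pvChain (v.drop (vi + t.length)) T).map
            (fun (m : Nat) => ((k : Int), ((j + 1 : Nat) : Int) + (m : Int))) := by
        refine List.map_congr_left ?_
        intro a _
        simp only [Function.comp]
        push_cast
        ring_nf
      by_cases hc : vi + t.length = v.length
      · rw [if_pos hc, if_pos (hcond.mp hc)]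
        simp only [List.map_append, List.map_map, List.append_assoc, hmap]
        push_cast
        simp
      · rw [if_neg hc, if_neg (fun hh => hc (hcond.mpr hh))]
        simp only [List.map_append, List.map_map, hmap]
        simp
    · rw [if_neg (by simp [PySem.Chars.startswith_iff, hp])]
      simp [pvChain, if_neg hp]

-- A as a flatMap of chains
lemma pvA_eq (sent : List String) (value : String) :
    find_val_pos sent value
      = (if pvNorm value = [] then [] else
          (List.range (sent.map pvNorm).length).flatMap
            (fun k => (pvChain (pvNorm value) ((sent.map pvNorm).drop k)).map
              (fun (m : Nat) => ((k : Int), (k : Int) + (m : Int))))) := by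
  by_cases hv : pvNorm value = []
  · simp [find_val_pos, hv]
  · simp only [find_val_pos, if_neg hv]
    have hbody : ∀ (acc : List (Int × Int)), ∀ kv ∈ PySem.List.enumerate (sent.map pvNorm) 0,
        (if ¬ (PySem.Chars.startswith (pvNorm value) kv.2 = true) then acc
         else pvInnerA (pvNorm value) kv.1.toNat ((sent.map pvNorm).drop kv.1.toNat) kv.1.toNat 0 acc)
        = acc ++ (pvChain (pvNorm value) ((sent.map pvNorm).drop kv.1.toNat)).map
            (fun (m : Nat) => ((kv.1.toNat : Int), (kv.1.toNat : Int) + (m : Int))) := by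
      intro acc kv hkv
      obtain ⟨k, hk, rfl⟩ := (PySem.List.mem_enumerate_iff (sent.map pvNorm) 0 kv).mp hkv
      have ht : ((0 : Int) + (k : Int)).toNat = k := by simp
      have hkm : k < sent.length := by simpa using hk
      simp only [ht, List.getElem_map]
      by_cases hsw : PySem.Chars.startswith (pvNorm value) (pvNorm (sent[k]'hkm)) = true
      · rw [if_neg (by simp [hsw])]
        rw [pvInnerA_eq _ _ _ _ _ _ (Nat.zero_le _)]
        rw [List.drop_zero]
      · rw [if_pos (by simp [hsw])]
        rw [List.drop_eq_getElem_cons hk]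
        simp only [List.getElem_map]
        have hnp : ¬ (pvNorm (sent[k]'hkm) <+: pvNorm value) := by
          intro hpre
          exact hsw ((PySem.Chars.startswith_iff _ _).mpr hpre)
        simp [pvChain, hnp]
    rw [PySem.List.foldl_congr_mem _ _ _ _ hbody]
    rw [PySem.List.foldl_append_eq_flatMap]
    rw [PySem.List.enumerate_eq_map_pyRange (sent.map pvNorm) []]
    rw [List.flatMap_map]
    simp only [PySem.List.len_eq, PySem.List.pyRange_zero_nat, List.flatMap_map]
    simp

-- the cumulative-offsets loop of B over any accumulator ending in c
lemma pvOffsAux (T : List (List Char)) : ∀ (acc : List Int) (c : Int),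
    T.foldl (fun offs t => offs ++ [PySem.List.pyGetD offs (-1) 0 + (t.length : Int)]) (acc ++ [c])
      = acc ++ [c] ++ (List.range T.length).map (fun i => c + (pvPref T (i + 1) : Int)) := by
  induction T with
  | nil => simp
  | cons t T ih =>
    intro acc c
    rw [List.foldl_cons, PySem.List.pyGetD_neg_one_append_singleton]
    rw [ih (acc ++ [c]) (c + (t.length : Int))]
    rw [List.length_cons, List.range_succ_eq_map]
    simp only [List.map_cons, List.map_map]
    have h0 : c + (pvPref (t :: T) (0 + 1) : Int) = c + (t.length : Int) := by
      rw [pvPref_cons, pvPref_zero]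
      push_cast
      ring
    have h1 : ((fun i => c + (pvPref (t :: T) (i + 1) : Int)) ∘ Nat.succ)
        = fun i => c + (t.length : Int) + (pvPref T (i + 1) : Int) := by
      funext i
      simp only [Function.comp, Nat.succ_eq_add_one]
      rw [pvPref_cons]
      push_cast
      ring
    rw [h0, h1]
    simp [List.append_assoc]

-- the offsets list of B
lemma pvOffs_eq (ss : List (List Char)) :
    ss.foldl (fun offs t => offs ++ [PySem.List.pyGetD offs (-1) 0 + (t.length : Int)]) [(0 : Int)]
      = (List.range (ss.length + 1)).map (fun i => (pvPref ss i : Int)) := by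
  have h := pvOffsAux ss [] 0
  simp only [List.nil_append] at h
  rw [h, List.range_succ_eq_map]
  simp only [List.map_cons, List.map_map]
  have h0 : ((0 : Nat) : Int) = (pvPref ss 0 : Int) := by rw [pvPref_zero]
  have h1 : ((fun i => (pvPref ss i : Int)) ∘ Nat.succ)
      = fun i => (0 : Int) + (pvPref ss (i + 1) : Int) := by
    funext i
    simp [Function.comp, Nat.succ_eq_add_one]
  rw [← h1]
  simp [pvPref_zero]

-- per-start core: B's substring test + offset lookup give exactly A's chain
lemma pvBkey (v : List Char) (ss : List (List Char)) (hv : v ≠ []) (k : Nat) (hk : k < ss.length) :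
    (if ((PySem.List.pyRange 1 ((ss.length : Int) + 1) 1).filter
          (fun e => PySem.List.pyGetD
              ((List.range (ss.length + 1)).map (fun i => (pvPref ss i : Int))) e 0
            == (pvPref ss k : Int) + (v.length : Int)) ≠ []
          ∧ PySem.Chars.startswith (ss.flatten.drop ((pvPref ss k : Int)).toNat) v = true)
      then ((PySem.List.pyRange 1 ((ss.length : Int) + 1) 1).filter
          (fun e => PySem.List.pyGetD
              ((List.range (ss.length + 1)).map (fun i => (pvPref ss i : Int))) e 0
            == (pvPref ss k : Int) + (v.length : Int))).map (fun e => ((k : Int), e))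
      else [])
    = (pvChain v (ss.drop k)).map (fun (m : Nat) => ((k : Int), (k : Int) + (m : Int))) := by
  have hvpos : 0 < v.length := List.length_pos_of_ne_nil hv
  have hsw_iff : (PySem.Chars.startswith (ss.flatten.drop (pvPref ss k)) v = true)
      ↔ ((ss.flatten.drop (pvPref ss k)).take v.length = v) := by
    rw [PySem.Chars.startswith_iff, List.prefix_iff_eq_take, eq_comm]
  have hcond : ∀ (F : List Int) (G : List (Int × Int)),
      (if (F ≠ [] ∧ PySem.Chars.startswith (ss.flatten.drop ((pvPref ss k : Int)).toNat) v
            = true) then G else [])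
      = (if (ss.flatten.drop (pvPref ss k)).take v.length = v then
          (if F ≠ [] then G else []) else []) := by
    intro F G
    by_cases hF : F = [] <;> by_cases hC : (ss.flatten.drop (pvPref ss k)).take v.length = v <;>
      simp [hF, hC, hsw_iff]
  rw [hcond]
  have hne : ∀ (F : List Int) (f : Int → Int × Int),
      (if F ≠ [] then F.map f else []) = F.map f := by
    intro F f
    by_cases hF : F = [] <;> simp [hF]
  rw [hne]
  have hrange : PySem.List.pyRange 1 ((ss.length : Int) + 1) 1
      = (List.range ss.length).map (fun (i : Nat) => ((1 : Int) + (i : Int))) := by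
    rw [PySem.List.pyRange_one]
    have : ((ss.length : Int) + 1 - 1).toNat = ss.length := by omega
    rw [this]
  rw [hrange, List.filter_map, List.map_map]
  have hOFF : ∀ i : Nat, i < ss.length →
      (((fun e => PySem.List.pyGetD
          ((List.range (ss.length + 1)).map (fun i => (pvPref ss i : Int))) e 0
          == (pvPref ss k : Int) + (v.length : Int)) ∘ (fun (i : Nat) => ((1 : Int) + (i : Int)))) i)
      = decide (pvPref ss (i + 1) = pvPref ss k + v.length) := by
    intro i hi
    simp only [Function.comp]
    have hcast : ((1 : Int) + (i : Int)) = ((i + 1 : Nat) : Int) := by push_cast; ring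
    rw [hcast, PySem.List.pyGetD_natCast, PySem.List.getD_map_range _ _ _ _ (by omega)]
    have : ((pvPref ss (i + 1) : Int) = (pvPref ss k : Int) + (v.length : Int))
        ↔ pvPref ss (i + 1) = pvPref ss k + v.length := by
      constructor <;> intro h <;> [exact_mod_cast h; exact_mod_cast congrArg (Nat.cast (R := Int)) h]
    rw [Bool.eq_iff_iff]
    simp [beq_iff_eq, this]
  rw [List.filter_congr (fun i hi => hOFF i (by simpa using hi))]
  rw [pvChain_eq, List.map_map, List.length_drop]
  by_cases hc : (ss.flatten.drop (pvPref ss k)).take v.length = v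
  · rw [if_pos hc]
    have hsplit : (List.range ss.length).filter
          (fun i => decide (pvPref ss (i + 1) = pvPref ss k + v.length))
        = ((List.range (ss.length - k)).filter
            (fun j => decide (pvPref ss (k + j + 1) = pvPref ss k + v.length))).map (k + ·) := by
      conv_lhs => rw [show ss.length = k + (ss.length - k) by omega, List.range_add]
      rw [List.filter_append, List.filter_map]
      have h1 : (List.range k).filter
          (fun i => decide (pvPref ss (i + 1) = pvPref ss k + v.length)) = [] := by
        rw [List.filter_eq_nil_iff]
        intro i hi
        have hik : i + 1 ≤ k := by simpa using List.mem_range.mp hi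
        have := pvPref_mono ss hik
        simp only [decide_eq_true_eq]
        omega
      rw [h1, List.nil_append]
      congr 1
    rw [hsplit, List.map_map]
    have hfeq : (List.range (ss.length - k)).filter
          (fun j => decide (pvPref ss (k + j + 1) = pvPref ss k + v.length))
        = (List.range (ss.length - k)).filter
          (fun j => decide (((ss.drop k).take (j + 1)).flatten = v)) := by
      apply List.filter_congr
      intro j hj
      have hke : k ≤ k + j + 1 := by omega
      have hmid := pvMiddle ss k (k + j + 1) hke
      have hmlen := pvMiddle_len ss k (k + j + 1) hke
      have hek : k + j + 1 - k = j + 1 := by omega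
      rw [hek] at hmid hmlen
      simp only [decide_eq_decide]
      constructor
      · intro h
        rw [hmid, h, Nat.add_sub_cancel_left]
        exact hc
      · intro h
        have hlen : v.length = pvPref ss (k + j + 1) - pvPref ss k := by
          rw [← hmlen, h]
        have hmono := pvPref_mono ss hke
        omega
    rw [hfeq]
    apply List.map_congr_left
    intro j hj
    simp only [Function.comp]
    congr 1
    push_cast
    ring
  · rw [if_neg hc]
    symm
    rw [List.map_eq_nil_iff, List.filter_eq_nil_iff]
    intro j hj
    simp only [decide_eq_true_eq]
    intro hflat
    have hke : k ≤ k + j + 1 := by omega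
    have hmid := pvMiddle ss k (k + j + 1) hke
    have hmlen := pvMiddle_len ss k (k + j + 1) hke
    have hek : k + j + 1 - k = j + 1 := by omega
    rw [hek] at hmid hmlen
    have hlen : pvPref ss (k + j + 1) - pvPref ss k = v.length := by
      rw [← hmlen, hflat]
    apply hc
    rw [← hlen, ← hmid]
    exact hflat

-- B as a flatMap over starts
lemma pvB_eq (sent : List String) (value : String) :
    find_val_pos_alt sent value
      = (if pvNorm value = [] then [] else
          (List.range (sent.map pvNorm).length).flatMap
            (fun k => (pvChain (pvNorm value) ((sent.map pvNorm).drop k)).map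
              (fun (m : Nat) => ((k : Int), (k : Int) + (m : Int))))) := by
  by_cases hv : pvNorm value = []
  · simp [find_val_pos_alt, hv]
  · simp only [find_val_pos_alt, if_neg hv]
    rw [pvOffs_eq]
    have hends : ∀ tgt : Int,
        ((PySem.List.pyRange 1 (((sent.map pvNorm).length : Int) + 1) 1).foldl
          (fun d e => d.modify (PySem.List.pyGetD
              ((List.range ((sent.map pvNorm).length + 1)).map
                (fun i => (pvPref (sent.map pvNorm) i : Int))) e 0) [] (· ++ [e]))
          PySem.Dict.empty).getD tgt []
        = (PySem.List.pyRange 1 (((sent.map pvNorm).length : Int) + 1) 1).filter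
            (fun e => PySem.List.pyGetD
              ((List.range ((sent.map pvNorm).length + 1)).map
                (fun i => (pvPref (sent.map pvNorm) i : Int))) e 0 == tgt) := by
      intro tgt
      rw [← List.foldl_map
        (f := fun e : Int => (PySem.List.pyGetD
            ((List.range ((sent.map pvNorm).length + 1)).map
              (fun i => (pvPref (sent.map pvNorm) i : Int))) e 0, e))
        (g := fun (d : PySem.Dict Int (List Int)) (p : Int × Int) =>
            d.modify p.1 [] (· ++ [p.2]))]
      rw [PySem.Dict.getD_foldl_modify_append, PySem.Dict.getD_empty, List.nil_append,
        List.filter_map, List.map_map]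
      simp [Function.comp_def]
    refine Eq.trans (PySem.List.foldl_congr_mem _ _
      (fun acc kk => acc ++ (pvChain (pvNorm value) ((sent.map pvNorm).drop kk.toNat)).map
        (fun (m : Nat) => ((kk.toNat : Int), (kk.toNat : Int) + (m : Int)))) _ ?_) ?_
    · intro acc kk hkk
      rw [PySem.List.pyRange_zero_nat] at hkk
      obtain ⟨k, hk, rfl⟩ := List.mem_map.mp hkk
      have hkn : k < (sent.map pvNorm).length := List.mem_range.mp hk
      have htn : ((k : Int)).toNat = k := by simp
      simp only [htn]
      have hOFFk : PySem.List.pyGetD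
          ((List.range ((sent.map pvNorm).length + 1)).map
            (fun i => (pvPref (sent.map pvNorm) i : Int))) ((k : Nat) : Int) 0
          = (pvPref (sent.map pvNorm) k : Int) := by
        rw [PySem.List.pyGetD_natCast, PySem.List.getD_map_range _ _ _ _ (by omega)]
      rw [hOFFk, hends]
      rw [← pvBkey (pvNorm value) (sent.map pvNorm) hv k hkn]
      split_ifs with h
      · rfl
      · simp
    · rw [PySem.List.foldl_append_eq_flatMap, List.nil_append, PySem.List.pyRange_zero_nat,
        List.flatMap_map]
      simp

-- ===== VERDICT (by name: the statement is the Claim_ definition above) =====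
theorem find_val_pos_spec : Claim_equal_find_val_pos := by
  intro sent value _
  unfold Spec_find_val_pos
  rw [pvA_eq, pvB_eq]
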